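-- pv_equiv track=rewrite | github.com/mkdev9/Ownpypractice | python_practices_100.py | max_sum_row_col
-- ===== SOURCE A (Python) =====
-- def max_sum_row_col(matrix):
--     if not matrix:
--         return None, None
--
--     # Row sums
--     row_sums = [sum(row) for row in matrix]
--     max_row = row_sums.index(max(row_sums))
--
--     # Column sums
--     col_sums = [sum(matrix[i][j] for i in range(len(matrix))) for j in range(len(matrix[0]))]
--     max_col = col_sums.index(max(col_sums))
--
--     return max_row, max_col
-- ===== SOURCE B (Python) =====
-- def max_sum_row_col(matrix):
--     if not matrix:
--         return None, None
--     ncols = len(matrix[0])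
--     row_sums = []
--     col_sums = [0] * ncols
--     for row in matrix:
--         row_sums.append(sum(row))
--         for j in range(ncols):
--             col_sums[j] += row[j]
--     return row_sums.index(max(row_sums)), col_sums.index(max(col_sums))
-- ===== Notes on version B (the rewrite author's own statement) =====
-- stated objective: alternative
-- what changed: B computes row sums and column sums in a single row-major pass over the matrix (one fold maintaining both accumulators) instead of A's two separate passes, the second of which scans the matrix column-major via matrix[i][j] index comprehensions.
import Mathlib
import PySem

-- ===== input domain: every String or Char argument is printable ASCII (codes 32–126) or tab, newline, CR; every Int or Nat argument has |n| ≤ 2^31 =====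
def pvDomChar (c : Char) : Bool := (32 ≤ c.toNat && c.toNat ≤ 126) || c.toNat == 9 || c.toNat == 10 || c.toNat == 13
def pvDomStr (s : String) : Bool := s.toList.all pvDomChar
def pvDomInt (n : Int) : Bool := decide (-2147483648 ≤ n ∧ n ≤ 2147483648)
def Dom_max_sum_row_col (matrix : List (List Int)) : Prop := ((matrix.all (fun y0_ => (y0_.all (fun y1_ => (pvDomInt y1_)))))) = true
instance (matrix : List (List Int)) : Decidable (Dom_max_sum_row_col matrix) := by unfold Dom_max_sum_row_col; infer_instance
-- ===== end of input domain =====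

-- B computes both accumulators in one row-major pass instead of A's two passes (the second column-major); return-value equivalence on Pre_.

-- ===== PORT A =====
-- xs.index(max(xs)) : Python max (first maximal) then .index; none exactly where Python raises ValueError (empty list)
def pyIdxMax (xs : List Int) : Option Int :=
  (PySem.List.max? xs (fun x => x)).bind (fun m => (PySem.List.index? xs m).map (fun k => (k : Int)))

def max_sum_row_col (matrix : List (List Int)) : Option Int × Option Int :=
  if matrix = [] then (none, none)
  else
    let row_sums := matrix.map (fun row => row.sum)
    let max_row := pyIdxMax row_sums
    let col_sums := (PySem.List.pyRange 0 ((PySem.List.pyGetD matrix 0 []).length : Int) 1).map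
      (fun j => (PySem.List.pyRange 0 (matrix.length : Int) 1).foldl
        (fun acc i => acc + PySem.List.pyGetD (PySem.List.pyGetD matrix i []) j 0) 0)
    let max_col := pyIdxMax col_sums
    (max_row, max_col)

-- ===== PORT B =====
def max_sum_row_col_alt (matrix : List (List Int)) : Option Int × Option Int :=
  match matrix with
  | [] => (none, none)
  | r0 :: _ =>
    let ncols := r0.length
    let st := matrix.foldl
      (fun (st : List Int × List Int) row =>
        (st.1 ++ [row.sum],
         (PySem.List.pyRange 0 (ncols : Int) 1).foldl
           (fun cs j => PySem.List.pySetD cs j (PySem.List.pyGetD cs j 0 + PySem.List.pyGetD row j 0)) st.2))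
      ([], List.replicate ncols 0)
    (pyIdxMax st.1, pyIdxMax st.2)

-- ===== PRECONDITION & SPEC =====
-- Pre_ excludes exactly the inputs where the Python A raises: a nonempty matrix whose first row is
-- empty (ValueError: max of empty col_sums) or containing a row shorter than the first row
-- (IndexError on matrix[i][j]); B raises on the same inputs.
def Pre_max_sum_row_col (matrix : List (List Int)) : Prop :=
  matrix = [] ∨ ((matrix.headD []).length ≠ 0 ∧ ∀ row ∈ matrix, (matrix.headD []).length ≤ row.length)
instance (matrix : List (List Int)) : Decidable (Pre_max_sum_row_col matrix) := by
  unfold Pre_max_sum_row_col; infer_instance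
def pvWitness_max_sum_row_col : List (List Int) := [[1, 2], [3, 4]]

def Spec_max_sum_row_col (matrix : List (List Int)) (out : Option Int × Option Int) : Prop := out = max_sum_row_col_alt matrix
instance (matrix : List (List Int)) (out : Option Int × Option Int) : Decidable (Spec_max_sum_row_col matrix out) := by unfold Spec_max_sum_row_col; infer_instance

-- ===== CLAIM (what is proved, stated in full; the proofs are below) =====
def Claim_equal_max_sum_row_col : Prop := ∀ (matrix : List (List Int)), Dom_max_sum_row_col matrix → Pre_max_sum_row_col matrix → Spec_max_sum_row_col matrix (max_sum_row_col matrix)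

-- ===== LEMMAS AND PROOFS =====

-- B's inner j-loop over one row, pointwise
lemma inner_getD (n : Nat) (cs row : List Int) (hlen : n ≤ cs.length) :
    ((PySem.List.pyRange 0 (n : Int) 1).foldl
      (fun cs j => PySem.List.pySetD cs j (PySem.List.pyGetD cs j 0 + PySem.List.pyGetD row j 0)) cs).length = cs.length ∧
    ∀ k : Nat, ((PySem.List.pyRange 0 (n : Int) 1).foldl
      (fun cs j => PySem.List.pySetD cs j (PySem.List.pyGetD cs j 0 + PySem.List.pyGetD row j 0)) cs).getD k 0
      = if k < n then cs.getD k 0 + row.getD k 0 else cs.getD k 0 := by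
  induction n with
  | zero => simp
  | succ n ih =>
    have hsplit : PySem.List.pyRange 0 ((n + 1 : Nat) : Int) 1
        = PySem.List.pyRange 0 (n : Int) 1 ++ [(n : Int)] := by
      push_cast
      exact PySem.List.pyRange_one_succ_right (a := 0) (b := (n:Int)) (by omega)
    obtain ⟨ihl, ihg⟩ := ih (Nat.le_of_succ_le hlen)
    rw [hsplit, List.foldl_append]
    constructor
    · simp [ihl]
    · intro k
      simp only [List.foldl_cons, List.foldl_nil, PySem.List.pySetD_natCast, PySem.List.pyGetD_natCast]
      rw [List.getD_eq_getElem?_getD, List.getElem?_set]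
      by_cases hk : k = n
      · subst hk
        have hklt : k < (List.foldl
            (fun cs j => PySem.List.pySetD cs j (PySem.List.pyGetD cs j 0 + PySem.List.pyGetD row j 0)) cs
            (PySem.List.pyRange 0 (k : Int) 1)).length := by rw [ihl]; omega
        simp [hklt]
        have h1 := ihg k
        rw [if_neg (lt_irrefl k)] at h1
        rw [List.getD_eq_getElem _ _ hklt] at h1
        rw [h1, List.getD_eq_getElem?_getD]
      · rw [if_neg (by omega)]
        rw [← List.getD_eq_getElem?_getD, ihg k]
        by_cases h2 : k < n
        · simp [h2, Nat.lt_succ_of_lt h2]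
        · simp [h2, show ¬ k < n + 1 by omega]

-- B's outer fold: row_sums part is map sum, col part accumulates pointwise
lemma outer_fold (rows : List (List Int)) (n : Nat) (rs cs : List Int) (hlen : cs.length = n) :
    (rows.foldl
      (fun (st : List Int × List Int) row =>
        (st.1 ++ [row.sum],
         (PySem.List.pyRange 0 (n : Int) 1).foldl
           (fun cs j => PySem.List.pySetD cs j (PySem.List.pyGetD cs j 0 + PySem.List.pyGetD row j 0)) st.2))
      (rs, cs)).1 = rs ++ rows.map (fun row => row.sum)
    ∧ (rows.foldl
      (fun (st : List Int × List Int) row =>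
        (st.1 ++ [row.sum],
         (PySem.List.pyRange 0 (n : Int) 1).foldl
           (fun cs j => PySem.List.pySetD cs j (PySem.List.pyGetD cs j 0 + PySem.List.pyGetD row j 0)) st.2))
      (rs, cs)).2.length = n
    ∧ ∀ k : Nat, k < n →
      (rows.foldl
      (fun (st : List Int × List Int) row =>
        (st.1 ++ [row.sum],
         (PySem.List.pyRange 0 (n : Int) 1).foldl
           (fun cs j => PySem.List.pySetD cs j (PySem.List.pyGetD cs j 0 + PySem.List.pyGetD row j 0)) st.2))
      (rs, cs)).2.getD k 0
      = cs.getD k 0 + (rows.map (fun row => row.getD k 0)).sum := by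
  induction rows generalizing rs cs with
  | nil => exact ⟨by simp, hlen, by simp⟩
  | cons r t ih =>
    obtain ⟨h1, h2⟩ := inner_getD n cs r (le_of_eq hlen.symm)
    obtain ⟨ih1, ih2, ih3⟩ := ih (rs ++ [r.sum]) _ (h1.trans hlen)
    refine ⟨by simpa using ih1, ih2, ?_⟩
    intro k hk
    rw [List.foldl_cons, ih3 k hk, h2 k, if_pos hk, List.map_cons, List.sum_cons]
    ring

theorem max_sum_row_col_spec_aux (matrix : List (List Int)) (hpre : Pre_max_sum_row_col matrix) :
    max_sum_row_col matrix = max_sum_row_col_alt matrix := by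
  rcases hpre with h | ⟨hne, hrows⟩
  · subst h; rfl
  · cases matrix with
    | nil => rfl
    | cons r0 rest =>
      simp only [List.headD_cons] at hne hrows
      unfold max_sum_row_col max_sum_row_col_alt
      rw [if_neg (by simp)]
      obtain ⟨b1, b2, b3⟩ := outer_fold (r0 :: rest) r0.length [] (List.replicate r0.length 0)
        (by simp)
      simp only []
      rw [b1]
      congr 1
      -- column sums: A's map over range vs B's accumulated list
      congr 1
      have hAlen : ((PySem.List.pyRange 0 ((PySem.List.pyGetD (r0 :: rest) 0 []).length : Int) 1).map
          (fun j => (PySem.List.pyRange 0 (((r0 :: rest).length : Int)) 1).foldl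
            (fun acc i => acc + PySem.List.pyGetD (PySem.List.pyGetD (r0 :: rest) i []) j 0) 0)).length
          = r0.length := by
        simp [PySem.List.length_pyRange_one, PySem.List.pyGetD_zero_cons]
      apply List.ext_getElem (by rw [hAlen, b2])
      intro k hk1 hk2
      have hkn : k < r0.length := by rwa [hAlen] at hk1
      -- A's entry k
      rw [List.getElem_map, PySem.List.getElem_pyRange_one]
      have hinner : (PySem.List.pyRange 0 (((r0 :: rest).length : Int)) 1).foldl
          (fun acc i => acc + PySem.List.pyGetD (PySem.List.pyGetD (r0 :: rest) i []) (0 + (k:Int)) 0) 0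
          = (r0 :: rest).foldl (fun acc row => acc + PySem.List.pyGetD row (0 + (k:Int)) 0) 0 :=
        PySem.List.foldl_pyRange_zero_pyGetD (r0 :: rest) []
          (fun acc row => acc + PySem.List.pyGetD row (0 + (k:Int)) 0) 0
      rw [hinner, PySem.List.foldl_add]
      -- B's entry k
      have := b3 k hkn
      rw [List.getD_eq_getElem?_getD, List.getElem?_eq_getElem hk2] at this
      simp only [Option.getD_some] at this
      rw [this]
      simp [PySem.List.pyGetD_natCast, hkn]

-- ===== VERDICT (by name: the statement is the Claim_ definition above) =====
theorem max_sum_row_col_spec : Claim_equal_max_sum_row_col := by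
  intro matrix _ hpre
  exact max_sum_row_col_spec_aux matrix hpre
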